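-- pv_equiv track=rewrite | github.com/pypi-data/pypi-mirror-371 | packages/cursword/cursword-0.1.1.tar.gz/cursword-0.1.1/cursword/cursword.py | get_next_word_end_position
-- ===== SOURCE A (Python) =====
-- import unicodedata
--
-- UNICODE_MATH_CATEGORY = "Sm"
--
-- UNICODE_MODIFIED_CATEGORY = "Sk"
--
-- def _is_word(c: str) -> bool:
--     return c.isalnum() or c == "_"
--
-- def _is_punc(c: str) -> bool:
--     uc = unicodedata.category(c)
--     return uc.startswith("P") or uc in (
--         UNICODE_MATH_CATEGORY,
--         UNICODE_MODIFIED_CATEGORY,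
--     )
--
-- def _is_currency(c: str) -> bool:
--     uc = unicodedata.category(c)
--     return uc == "Sc"
--
-- CAT_NONE = -1
--
-- CAT_SPACE = 0
--
-- CAT_WORD = 1
--
-- CAT_PUNC = 2
--
-- CAT_CURR = 3
--
-- CAT_OTHER = 4
--
-- def _get_category(c: str) -> int:
--     if c == " ":
--         return CAT_SPACE
--     elif _is_word(c):
--         return CAT_WORD
--     elif _is_punc(c):
--         return CAT_PUNC
--     elif _is_currency(c):
--         return CAT_CURR
--     else:
--         return CAT_OTHER
--
-- def get_next_word_end_position(text: str, start: int) -> int: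
--     """
--     Find **the end of** current or next word in given text.
--     :param text: given text
--     :param start: position from when to start search.
--         If a word starts at this position, find the end of this word.
--     :return: position of first character after current of next word,
--         so that `position - 1` is the actual end of current or next word.
--     """
--
--     start = min(max(0, start), max(0, len(text) - 1))
--     cat = CAT_NONE
--     for i in range(start, len(text)):
--         local_cat = _get_category(text[i])
--         if cat == CAT_NONE:
--             if local_cat != CAT_SPACE:
--                 cat = local_cat
--         elif local_cat != cat:
--             return i
--     else:
--         return len(text)
-- ===== SOURCE B (Python) =====
-- import unicodedata
--
-- UNICODE_MATH_CATEGORY = "Sm"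
-- UNICODE_MODIFIED_CATEGORY = "Sk"
--
-- def _is_word(c: str) -> bool:
--     return c.isalnum() or c == "_"
--
-- def _is_punc(c: str) -> bool:
--     uc = unicodedata.category(c)
--     return uc.startswith("P") or uc in (
--         UNICODE_MATH_CATEGORY,
--         UNICODE_MODIFIED_CATEGORY,
--     )
--
-- def _is_currency(c: str) -> bool:
--     return unicodedata.category(c) == "Sc"
--
-- CAT_NONE = -1
-- CAT_SPACE = 0
-- CAT_WORD = 1
-- CAT_PUNC = 2
-- CAT_CURR = 3
-- CAT_OTHER = 4
--
-- def _get_category(c: str) -> int: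
--     if c == " ":
--         return CAT_SPACE
--     elif _is_word(c):
--         return CAT_WORD
--     elif _is_punc(c):
--         return CAT_PUNC
--     elif _is_currency(c):
--         return CAT_CURR
--     else:
--         return CAT_OTHER
--
-- def get_next_word_end_position(text: str, start: int) -> int:
--     # Different algorithm: run-length encode the whole text into maximal
--     # same-category runs, then the answer is the end of the first non-space
--     # run that ends strictly after the clamped start position.
--     n = len(text)
--     i0 = min(max(0, start), max(0, n - 1))
--     runs = []  # [category, end_exclusive]
--     for idx, c in enumerate(text):
--         cat = _get_category(c)
--         if runs and runs[-1][0] == cat: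
--             runs[-1][1] = idx + 1
--         else:
--             runs.append([cat, idx + 1])
--     for cat, end in runs:
--         if end > i0 and cat != CAT_SPACE:
--             return end
--     return n
-- ===== Notes on version B (the rewrite author's own statement) =====
-- stated objective: alternative
-- what changed: Instead of A's single stateful scan from the start position, B run-length encodes the entire text into maximal same-category runs and returns the end of the first non-space run ending strictly after the clamped start.
import Mathlib
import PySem

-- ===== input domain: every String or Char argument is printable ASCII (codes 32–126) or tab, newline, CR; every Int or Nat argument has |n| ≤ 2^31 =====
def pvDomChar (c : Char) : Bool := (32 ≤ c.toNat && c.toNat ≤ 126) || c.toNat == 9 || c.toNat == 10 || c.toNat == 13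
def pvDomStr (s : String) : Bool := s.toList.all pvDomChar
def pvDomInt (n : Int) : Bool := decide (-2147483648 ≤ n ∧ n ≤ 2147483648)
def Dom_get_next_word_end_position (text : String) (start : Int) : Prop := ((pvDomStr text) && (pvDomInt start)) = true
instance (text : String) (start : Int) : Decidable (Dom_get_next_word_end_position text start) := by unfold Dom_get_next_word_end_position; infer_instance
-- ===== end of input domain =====

-- B replaces A's stateful scan from the start position by a run-length encoding of the
-- whole text into category runs, answering with the end of the first non-space run that
-- ends after the clamped start — a different algorithm of the same O(n) cost.


-- shared module helper _get_category (branch order as in Python: space, word, punc, currency, other);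
-- unicodedata categories are hardcoded for the stated ASCII+tab/newline/CR domain, where this is exact
def pyGetCategory (c : Char) : Int :=
  if c = ' ' then 0
  else if c.isAlphanum || c = '_' then 1
  else if ("!\"#%&'()*+,-./:;<=>?@[\\]^`{|}~".toList.contains c) then 2
  else if c = '$' then 3
  else 4

-- ===== PORT A =====
-- the for-loop with sentinel state `cat` (CAT_NONE = -1), carried over the remaining chars
def pyLoopA (cs : List Char) (i : Int) (cat : Int) (n : Int) : Int :=
  match cs with
  | [] => n
  | c :: rest =>
    let localCat := pyGetCategory c
    if cat = -1 then
      if localCat ≠ 0 then pyLoopA rest (i + 1) localCat n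
      else pyLoopA rest (i + 1) cat n
    else if localCat ≠ cat then i
    else pyLoopA rest (i + 1) cat n

def get_next_word_end_position (text : String) (start : Int) : Int :=
  let n : Int := (text.toList.length : Int)
  let start' := min (max 0 start) (max 0 (n - 1))
  pyLoopA (text.toList.drop start'.toNat) start' (-1) n

-- ===== PORT B =====
-- the RLE loop: runs is the list of (category, end_exclusive) built so far; the last run
-- is extended in place when the next char has the same category, else a new run is appended
def pyRLE (cs : List Char) (idx : Int) (runs : List (Int × Int)) : List (Int × Int) :=
  match cs with
  | [] => runs
  | c :: rest =>
    let cat := pyGetCategory c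
    let runs' :=
      match runs.getLast? with
      | some (lc, _) =>
        if lc = cat then runs.dropLast ++ [(lc, idx + 1)] else runs ++ [(cat, idx + 1)]
      | none => [(cat, idx + 1)]
    pyRLE rest (idx + 1) runs'

-- the answer scan: first run ending strictly after i0 whose category is not CAT_SPACE
def pyFindRun (runs : List (Int × Int)) (i0 : Int) (n : Int) : Int :=
  match runs with
  | [] => n
  | (cat, e) :: rest => if e > i0 ∧ cat ≠ 0 then e else pyFindRun rest i0 n

def get_next_word_end_position_alt (text : String) (start : Int) : Int :=
  let n : Int := (text.toList.length : Int)
  let i0 := min (max 0 start) (max 0 (n - 1))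
  pyFindRun (pyRLE text.toList 0 []) i0 n

-- ===== PRECONDITION & SPEC =====
def Spec_get_next_word_end_position (text : String) (start : Int) (out : Int) : Prop := out = get_next_word_end_position_alt text start
instance (text : String) (start : Int) (out : Int) : Decidable (Spec_get_next_word_end_position text start out) := by unfold Spec_get_next_word_end_position; infer_instance

-- ===== CLAIM (what is proved, stated in full; the proofs are below) =====
def Claim_equal_get_next_word_end_position : Prop := ∀ (text : String) (start : Int), Dom_get_next_word_end_position text start → Spec_get_next_word_end_position text start (get_next_word_end_position text start)

-- ===== LEMMAS AND PROOFS =====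

-- proof-side helper: A's loop once the sentinel has been replaced by a real category
def pyRunB (cat : Int) (cs : List Char) (i : Int) : Int :=
  match cs with
  | [] => i
  | c :: rest => if pyGetCategory c = cat then pyRunB cat rest (i + 1) else i

theorem pyGetCategory_ne_neg_one (c : Char) : pyGetCategory c ≠ -1 := by
  unfold pyGetCategory; split_ifs <;> decide

theorem loopA_eq_runB (cs : List Char) (i cat n : Int)
    (hcat : cat ≠ -1) (hn : n = i + cs.length) :
    pyLoopA cs i cat n = pyRunB cat cs i := by
  induction cs generalizing i with
  | nil => simp only [pyLoopA, pyRunB]; simp at hn; omega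
  | cons c rest ih =>
    simp only [pyLoopA, pyRunB]
    by_cases h : pyGetCategory c = cat
    · simp only [h, if_neg hcat, ite_not]
      apply ih
      simp at hn ⊢; omega
    · simp [hcat, h]

-- one unfolding step of the RLE loop when the accumulator ends in run (lc, e)
theorem pyRLE_concat_cons (c : Char) (rest : List Char) (idx lc e : Int)
    (rs : List (Int × Int)) :
    pyRLE (c :: rest) idx (rs ++ [(lc, e)]) =
      if lc = pyGetCategory c then pyRLE rest (idx + 1) (rs ++ [(lc, idx + 1)])
      else pyRLE rest (idx + 1) (rs ++ [(lc, e), (pyGetCategory c, idx + 1)]) := by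
  simp only [pyRLE, List.getLast?_concat, List.dropLast_concat]
  by_cases h : lc = pyGetCategory c <;> simp [h]

theorem pyRLE_singleton_cons (c : Char) (rest : List Char) (idx lc e : Int) :
    pyRLE (c :: rest) idx [(lc, e)] =
      if lc = pyGetCategory c then pyRLE rest (idx + 1) [(lc, idx + 1)]
      else pyRLE rest (idx + 1) [(lc, e), (pyGetCategory c, idx + 1)] := by
  have h := pyRLE_concat_cons c rest idx lc e []
  simpa using h

-- only the LAST run of the accumulator is ever inspected or modified, so a prefix splits off
theorem rle_split (cs : List Char) (idx : Int) (rs : List (Int × Int)) (r : Int × Int) :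
    pyRLE cs idx (rs ++ [r]) = rs ++ pyRLE cs idx [r] := by
  induction cs generalizing idx rs r with
  | nil => simp [pyRLE]
  | cons c rest ih =>
    obtain ⟨lc, e⟩ := r
    rw [pyRLE_concat_cons, pyRLE_singleton_cons]
    by_cases h : lc = pyGetCategory c
    · rw [if_pos h, if_pos h, ih]
    · rw [if_neg h, if_neg h]
      rw [show rs ++ [(lc, e), (pyGetCategory c, idx + 1)]
            = (rs ++ [(lc, e)]) ++ [(pyGetCategory c, idx + 1)] by simp, ih]
      rw [show ([(lc, e), (pyGetCategory c, idx + 1)] : List (Int × Int))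
            = [(lc, e)] ++ [(pyGetCategory c, idx + 1)] from rfl, ih]
      simp

-- one step of B's combined computation with a single carried run (lc, idx)
theorem step_H (c : Char) (rest : List Char) (idx lc i0 n : Int) :
    pyFindRun (pyRLE (c :: rest) idx [(lc, idx)]) i0 n =
      if pyGetCategory c = lc then pyFindRun (pyRLE rest (idx + 1) [(lc, idx + 1)]) i0 n
      else if idx > i0 ∧ lc ≠ 0 then idx
      else pyFindRun (pyRLE rest (idx + 1) [(pyGetCategory c, idx + 1)]) i0 n := by
  rw [pyRLE_singleton_cons]
  by_cases h : pyGetCategory c = lc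
  · rw [if_pos h.symm, if_pos h]
  · rw [if_neg (fun hh => h hh.symm), if_neg h]
    rw [show ([(lc, idx), (pyGetCategory c, idx + 1)] : List (Int × Int))
          = [(lc, idx)] ++ [(pyGetCategory c, idx + 1)] from rfl, rle_split]
    simp only [List.singleton_append]
    simp [pyFindRun]

-- past the start position with a non-space carried category, B behaves as the plain run consumer
theorem H_run (cs : List Char) (idx lc i0 n : Int)
    (hlc : lc ≠ 0) (hidx : idx > i0) (hn : n = idx + cs.length) :
    pyFindRun (pyRLE cs idx [(lc, idx)]) i0 n = pyRunB lc cs idx := by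
  induction cs generalizing idx with
  | nil => simp [pyRLE, pyFindRun, pyRunB, hidx, hlc]
  | cons c rest ih =>
    rw [step_H]
    simp only [pyRunB]
    by_cases h : pyGetCategory c = lc
    · rw [if_pos h, if_pos h]
      exact ih (idx + 1) (by omega) (by simp at hn ⊢; omega)
    · rw [if_neg h, if_pos ⟨hidx, hlc⟩, if_neg h]

-- past the start position with the space category carried, B behaves as A's sentinel loop
theorem H_space (cs : List Char) (idx i0 n : Int)
    (hidx : idx > i0) (hn : n = idx + cs.length) :
    pyFindRun (pyRLE cs idx [(0, idx)]) i0 n = pyLoopA cs idx (-1) n := by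
  induction cs generalizing idx with
  | nil => simp [pyRLE, pyFindRun, pyLoopA, hn]
  | cons c rest ih =>
    rw [step_H]
    have hn' : n = (idx + 1) + (rest.length : Int) := by simp at hn ⊢; omega
    by_cases h : pyGetCategory c = 0
    · rw [if_pos h,
        show pyLoopA (c :: rest) idx (-1) n = pyLoopA rest (idx + 1) (-1) n by
          simp [pyLoopA, h]]
      exact ih (idx + 1) (by omega) hn'
    · rw [if_neg h, if_neg (by simp : ¬ (idx > i0 ∧ (0 : Int) ≠ 0)),
        show pyLoopA (c :: rest) idx (-1) n = pyLoopA rest (idx + 1) (pyGetCategory c) n by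
          simp [pyLoopA, h]]
      rw [H_run rest (idx + 1) (pyGetCategory c) i0 n h (by omega) hn',
        loopA_eq_runB rest (idx + 1) (pyGetCategory c) n (pyGetCategory_ne_neg_one c) hn']

-- before the start position the carried state is irrelevant: B reduces to A's loop from i0
theorem H_bridge (cs : List Char) (idx lc i0 n : Int)
    (h1 : idx ≤ i0) (h2 : i0 < idx + cs.length) (hn : n = idx + cs.length) :
    pyFindRun (pyRLE cs idx [(lc, idx)]) i0 n
      = pyLoopA (cs.drop (i0 - idx).toNat) i0 (-1) n := by
  induction cs generalizing idx lc with
  | nil => simp at h2; omega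
  | cons c rest ih =>
    have hn' : n = (idx + 1) + (rest.length : Int) := by simp at hn ⊢; omega
    by_cases heq : idx = i0
    · subst heq
      have hd : ((idx - idx).toNat) = 0 := by omega
      rw [step_H, hd, List.drop_zero]
      have hnot : ¬ (idx > idx ∧ lc ≠ 0) := by omega
      by_cases hc : pyGetCategory c = 0
      · rw [show pyLoopA (c :: rest) idx (-1) n = pyLoopA rest (idx + 1) (-1) n by
          simp [pyLoopA, hc]]
        by_cases hcl : pyGetCategory c = lc
        · have hlc0 : lc = 0 := by rw [← hcl]; exact hc
          rw [if_pos hcl, hlc0]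
          exact H_space rest (idx + 1) idx n (by omega) hn'
        · rw [if_neg hcl, if_neg hnot, hc]
          exact H_space rest (idx + 1) idx n (by omega) hn'
      · rw [show pyLoopA (c :: rest) idx (-1) n = pyLoopA rest (idx + 1) (pyGetCategory c) n by
          simp [pyLoopA, hc]]
        rw [loopA_eq_runB rest (idx + 1) (pyGetCategory c) n (pyGetCategory_ne_neg_one c) hn']
        by_cases hcl : pyGetCategory c = lc
        · rw [if_pos hcl, ← hcl]
          exact H_run rest (idx + 1) (pyGetCategory c) idx n hc (by omega) hn'
        · rw [if_neg hcl, if_neg hnot]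
          exact H_run rest (idx + 1) (pyGetCategory c) idx n hc (by omega) hn'
    · have hlt : idx < i0 := lt_of_le_of_ne h1 heq
      have hlen : ((c :: rest).length : Int) = (rest.length : Int) + 1 := by simp
      have h2' : i0 < (idx + 1) + (rest.length : Int) := by omega
      rw [step_H]
      have hd : (i0 - idx).toNat = (i0 - (idx + 1)).toNat + 1 := by omega
      rw [hd, List.drop_succ_cons]
      have hnot : ¬ (idx > i0 ∧ lc ≠ 0) := by omega
      by_cases hcl : pyGetCategory c = lc
      · rw [if_pos hcl, ← hcl]
        exact ih (idx + 1) (pyGetCategory c) (by omega) h2' hn'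
      · rw [if_neg hcl, if_neg hnot]
        exact ih (idx + 1) (pyGetCategory c) (by omega) h2' hn'

-- ===== VERDICT (by name: the statement is the Claim_ definition above) =====
theorem get_next_word_end_position_spec : Claim_equal_get_next_word_end_position := by
  intro text start _
  unfold Spec_get_next_word_end_position get_next_word_end_position get_next_word_end_position_alt
  symm
  cases hcs : text.toList with
  | nil => simp [pyLoopA, pyRLE, pyFindRun]
  | cons c cs =>
    simp only [hcs]
    have hlen : ((c :: cs).length : Int) = (cs.length : Int) + 1 := by simp
    set n : Int := ((c :: cs).length : Int) with hndef
    set i0 : Int := min (max 0 start) (max 0 (n - 1)) with hi0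
    have hn2 : n = 1 + (cs.length : Int) := by omega
    have hi0lo : 0 ≤ i0 := by omega
    have hi0hi : i0 ≤ n - 1 := by omega
    have hfirst : pyRLE (c :: cs) 0 [] = pyRLE cs 1 [(pyGetCategory c, 1)] := by
      simp [pyRLE]
    rw [hfirst]
    by_cases hz : i0 = 0
    · rw [hz]
      have hdrop : (c :: cs).drop (0 : Int).toNat = c :: cs := by simp
      rw [hdrop]
      by_cases hc : pyGetCategory c = 0
      · rw [show pyLoopA (c :: cs) 0 (-1) n = pyLoopA cs 1 (-1) n by
          simp [pyLoopA, hc], hc]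
        exact H_space cs 1 0 n (by omega) hn2
      · rw [show pyLoopA (c :: cs) 0 (-1) n = pyLoopA cs 1 (pyGetCategory c) n by
          simp [pyLoopA, hc]]
        rw [H_run cs 1 (pyGetCategory c) 0 n hc (by omega) hn2,
          loopA_eq_runB cs 1 (pyGetCategory c) n (pyGetCategory_ne_neg_one c) hn2]
    · have h1 : (1 : Int) ≤ i0 := by omega
      have hdrop : (c :: cs).drop i0.toNat = cs.drop (i0 - 1).toNat := by
        have ht : i0.toNat = (i0 - 1).toNat + 1 := by omega
        rw [ht]; simp
      rw [hdrop]
      exact H_bridge cs 1 (pyGetCategory c) i0 n h1 (by omega) hn2
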